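-- pv_equiv track=rewrite | github.com/maitesin/advent | 2017/14/part_2/code.py | binary_array
-- ===== SOURCE A (Python) =====
-- def binary_array(hash):
--     array = []
--     for char in hash:
--         value = int(char, 16)
--         small = []
--         index = 4
--         while value != 0:
--             small.append('#' if value % 2 == 1 else '.')
--             value = value >> 1
--             index -= 1
--         while index != 0:
--             small.append('.')
--             index -= 1
--         small.reverse()
--         array += small
--     return array
-- ===== SOURCE B (Python) =====
-- def binary_array(hash):
--     array = []
--     for char in hash:
--         value = int(char, 16)
--         array.extend('#' if (value >> shift) & 1 else '.' for shift in (3, 2, 1, 0))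
--     return array
-- ===== Notes on version B (the rewrite author's own statement) =====
-- stated objective: simpler
-- what changed: B emits each hex digit's 4 bits MSB-first directly via shift-and-mask, removing A's LSB extraction loop, the separate padding loop, the per-digit temporary list and its reversal.
import Mathlib
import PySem

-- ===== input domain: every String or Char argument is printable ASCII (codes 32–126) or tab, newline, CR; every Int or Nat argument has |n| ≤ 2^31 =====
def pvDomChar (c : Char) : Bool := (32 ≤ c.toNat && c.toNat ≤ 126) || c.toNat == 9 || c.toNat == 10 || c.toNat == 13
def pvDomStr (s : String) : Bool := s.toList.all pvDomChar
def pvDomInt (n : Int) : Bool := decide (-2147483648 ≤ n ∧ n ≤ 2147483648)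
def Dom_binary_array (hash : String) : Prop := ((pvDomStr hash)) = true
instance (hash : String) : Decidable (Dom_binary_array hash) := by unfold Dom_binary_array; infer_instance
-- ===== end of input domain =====

-- B replaces A's LSB-extraction loop + padding loop + reversal by emitting the 4 bits MSB-first.

-- ===== PORT A =====
-- int(char, 16) for a single char: some value for a hex digit, none = ValueError (excluded by Pre_).
def hexVal (c : Char) : Option Nat :=
  if 48 ≤ c.toNat ∧ c.toNat ≤ 57 then some (c.toNat - 48)
  else if 97 ≤ c.toNat ∧ c.toNat ≤ 102 then some (c.toNat - 87)
  else if 65 ≤ c.toNat ∧ c.toNat ≤ 70 then some (c.toNat - 55)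
  else none

-- while value != 0: append bit, value >>= 1, index -= 1.  value and index are carried as Nat:
-- exact because int(char,16) is nonnegative (so Python's >> 1 is /2) and index stays ≥ 0 (value ≤ 15).
def pvBitsLoop (value : Nat) (index : Nat) (small : List String) : List String × Nat :=
  if value ≠ 0 then
    pvBitsLoop (value / 2) (index - 1) (small ++ [if value % 2 == 1 then "#" else "."])
  else (small, index)

-- while index != 0: append '.', index -= 1
def pvPadLoop (index : Nat) (small : List String) : List String :=
  match index with
  | 0 => small
  | n + 1 => pvPadLoop n (small ++ ["."])

def binary_array (hash : String) : List String :=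
  hash.toList.foldl (fun array c =>
    match hexVal c with
    | none => array   -- Python raises ValueError here; outside Pre_
    | some value =>
      let (small, index) := pvBitsLoop value 4 []
      array ++ (pvPadLoop index small).reverse) []

-- ===== PORT B =====
def binary_array_alt (hash : String) : List String :=
  hash.toList.foldl (fun array c =>
    match hexVal c with
    | none => array   -- Python raises ValueError here; outside Pre_
    | some value =>
      array ++ [3, 2, 1, 0].map (fun shift => if (value >>> shift) &&& 1 ≠ 0 then "#" else ".")) []

-- ===== PRECONDITION & SPEC =====
-- Pre_ excludes exactly the inputs where int(char, 16) raises ValueError: non-hex-digit characters.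
def Pre_binary_array (hash : String) : Prop :=
  (hash.toList.all fun c => (48 ≤ c.toNat && c.toNat ≤ 57) || (97 ≤ c.toNat && c.toNat ≤ 102) || (65 ≤ c.toNat && c.toNat ≤ 70)) = true
instance (hash : String) : Decidable (Pre_binary_array hash) := by unfold Pre_binary_array; infer_instance
def pvWitness_binary_array : String := "0aF"
def Spec_binary_array (hash : String) (out : List String) : Prop := out = binary_array_alt hash
instance (hash : String) (out : List String) : Decidable (Spec_binary_array hash out) := by unfold Spec_binary_array; infer_instance

-- ===== CLAIM (what is proved, stated in full; the proofs are below) =====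
def Claim_equal_binary_array : Prop := ∀ (hash : String), Dom_binary_array hash → Pre_binary_array hash → Spec_binary_array hash (binary_array hash)

-- ===== LEMMAS AND PROOFS =====

theorem hexVal_lt (c : Char) (v : Nat) (h : hexVal c = some v) : v < 16 := by
  unfold hexVal at h
  split_ifs at h with h1 h2 h3 <;> simp only [Option.some.injEq] at h <;> omega

theorem perChar_eq (v : Nat) (hv : v < 16) :
    (pvPadLoop (pvBitsLoop v 4 []).2 (pvBitsLoop v 4 []).1).reverse =
    [3, 2, 1, 0].map (fun shift => if (v >>> shift) &&& 1 ≠ 0 then "#" else ".") := by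
  interval_cases v <;> simp [pvBitsLoop, pvPadLoop]

-- ===== VERDICT (by name: the statement is the Claim_ definition above) =====
theorem binary_array_spec : Claim_equal_binary_array := by
  intro hash _ _
  unfold Spec_binary_array binary_array binary_array_alt
  congr 1
  funext array c
  cases h : hexVal c with
  | none => rfl
  | some v => simpa using congrArg (array ++ ·) (perChar_eq v (hexVal_lt c v h))
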